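-- pv_equiv track=rewrite | github.com/poli404/2-8 | Fundamentos/notaVestibular.py | somatorio_alternativas
-- ===== SOURCE A (Python) =====
-- def somatorio_alternativas(s: int) -> list[int]:
--     '''Calcula a lista de alternativas que somadas gera o somátorio *s*. Cada alternativa pode ser um dos valores: 1, 2, 4, 8, 16. Requer que *s* esteja no entre 0 e 31.
--     Exemplos
--     >>> somatorio_alternativas(0)
--     []
--     >>> somatorio_alternativas(1)
--     [1]
--     >>> somatorio_alternativas(21)
--     [1, 4, 16]
--     >>> somatorio_alternativas(10)
--     [2, 8]
--     >>> somatorio_alternativas(31)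
--     [1, 2, 4, 8, 16]
--     '''
--     alternativas = []
--     alternativa = 1
--     while s > 0:
--     # verifica se alternativa faz parte do somatório s
--         if s % 2 == 1:
--             alternativas.append(alternativa)
--     # divide todas as alternativas que compõe
--     # o somatório s por 2
--         s = s // 2
--     # procura a próxima alternativa
--         alternativa = alternativa * 2
--     return alternativas
-- ===== SOURCE B (Python) =====
-- def somatorio_alternativas(s: int) -> list[int]:
--     if s <= 0:
--         return []
--     return [2 ** i for i, c in enumerate(bin(s)[:1:-1]) if c == '1']
-- ===== Notes on version B (the rewrite author's own statement) =====
-- stated objective: idiomatic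
-- what changed: B builds the result from the binary digit string of s (an enumerate comprehension appending the corresponding power of two for each set bit) instead of A's while-loop that repeatedly halves s while doubling an accumulator.
import Mathlib
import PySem

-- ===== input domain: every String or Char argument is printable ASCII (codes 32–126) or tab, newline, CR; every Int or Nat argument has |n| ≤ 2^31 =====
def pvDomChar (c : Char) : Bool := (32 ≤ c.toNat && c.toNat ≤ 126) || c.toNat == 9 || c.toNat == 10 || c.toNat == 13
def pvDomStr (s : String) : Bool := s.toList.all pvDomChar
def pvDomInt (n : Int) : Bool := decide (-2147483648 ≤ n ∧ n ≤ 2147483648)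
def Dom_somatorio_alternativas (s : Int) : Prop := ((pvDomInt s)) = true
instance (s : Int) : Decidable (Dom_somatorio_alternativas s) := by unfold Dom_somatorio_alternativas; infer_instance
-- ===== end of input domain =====

-- B extracts the set bits from the binary digit string (comprehension over enumerate(bin(s))) instead of A's repeated division loop; objective: idiomatic.

-- ===== PORT A =====
-- the while loop of A: state (s, alternativa, alternativas)
def somAuxA (s alternativa : Int) (acc : List Int) : List Int :=
  if s > 0 then
    somAuxA (PySem.Int.floordiv s 2) (alternativa * 2)
      (if PySem.Int.mod s 2 = 1 then acc ++ [alternativa] else acc)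
  else acc
termination_by s.toNat
decreasing_by
  have : PySem.Int.floordiv s 2 = s / 2 := PySem.Int.floordiv_eq_ediv_of_pos (by omega)
  rw [this]; omega

def somatorio_alternativas (s : Int) : List Int := somAuxA s 1 []

-- ===== PORT B =====
-- bin(s)[:1:-1] as the list of binary digits, least-significant first
def binDigits (n : Nat) : List Nat :=
  if h : n = 0 then [] else n % 2 :: binDigits (n / 2)
decreasing_by omega

def somatorio_alternativas_alt (s : Int) : List Int :=
  if s ≤ 0 then []
  else (PySem.List.enumerate (binDigits s.toNat) 0).filterMap
    (fun p => if p.2 = 1 then some ((2 : Int) ^ p.1.toNat) else none)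

-- ===== PRECONDITION & SPEC =====
def Spec_somatorio_alternativas (s : Int) (out : List Int) : Prop := out = somatorio_alternativas_alt s
instance (s : Int) (out : List Int) : Decidable (Spec_somatorio_alternativas s out) := by unfold Spec_somatorio_alternativas; infer_instance

-- ===== CLAIM (what is proved, stated in full; the proofs are below) =====
def Claim_equal_somatorio_alternativas : Prop := ∀ (s : Int), Dom_somatorio_alternativas s → Spec_somatorio_alternativas s (somatorio_alternativas s)

-- ===== LEMMAS AND PROOFS =====
lemma somAuxA_eq (n : Nat) : ∀ (k : Nat) (acc : List Int),
    somAuxA (n : Int) ((2 : Int) ^ k) acc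
      = acc ++ (PySem.List.enumerate (binDigits n) (k : Int)).filterMap
          (fun p => if p.2 = 1 then some ((2 : Int) ^ p.1.toNat) else none) := by
  induction n using Nat.strong_induction_on with
  | _ n ih =>
    intro k acc
    by_cases h0 : n = 0
    · subst h0
      rw [somAuxA, binDigits]
      simp
    · rw [somAuxA, binDigits]
      have hpos : ((n : Int) > 0) := by exact_mod_cast Nat.pos_of_ne_zero h0
      have hmod : PySem.Int.mod (n : Int) 2 = ((n % 2 : Nat) : Int) := by
        exact_mod_cast PySem.Int.mod_natCast n 2
      have hdiv : PySem.Int.floordiv (n : Int) 2 = ((n / 2 : Nat) : Int) := by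
        exact_mod_cast PySem.Int.floordiv_natCast n 2
      rw [if_pos hpos, dif_neg h0, hmod, hdiv]
      have hlt : n / 2 < n := Nat.div_lt_self (Nat.pos_of_ne_zero h0) (by omega)
      have hpow : (2 : Int) ^ k * 2 = (2 : Int) ^ (k + 1) := by ring
      rw [hpow, ih (n / 2) hlt (k + 1)]
      rw [PySem.List.enumerate_cons]
      have hk1 : ((k : Int) + 1) = ((k + 1 : Nat) : Int) := by push_cast; ring
      rw [hk1]
      by_cases hm : n % 2 = 1
      · have h1 : ((n : Int) % 2 = 1) := by omega
        simp [h1, hm]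
      · have h1 : ¬ ((n : Int) % 2 = 1) := by omega
        simp [h1, hm]

-- ===== VERDICT (by name: the statement is the Claim_ definition above) =====
theorem somatorio_alternativas_spec : Claim_equal_somatorio_alternativas := by
  intro s _
  unfold Spec_somatorio_alternativas somatorio_alternativas somatorio_alternativas_alt
  by_cases h : s ≤ 0
  · rw [somAuxA, if_neg (by omega : ¬ s > 0), if_pos h]
  · rw [if_neg h]
    have hs : ((s.toNat : Nat) : Int) = s := Int.toNat_of_nonneg (by omega)
    have := somAuxA_eq s.toNat 0 []
    rw [hs] at this
    simpa using this
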